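-- pv_equiv track=rewrite | github.com/SFUMECJF/linux-command | shell_project/tests/run-tests.py | replace_whitespace
-- ===== SOURCE A (Python) =====
-- def replace_whitespace(string):
--     output = ""
--     for i in range(len(string)):
--         if string[i] == "\t":
--             output += "\t⇥"
--         elif string[i] == "\n":
--             output += "⏎\n"
--         else:
--             output += string[i]
--     return output
-- ===== SOURCE B (Python) =====
-- def replace_whitespace(string):
--     return string.replace("\t", "\t\u21e5").replace("\n", "\u23ce\n")
-- ===== Notes on version B (the rewrite author's own statement) =====
-- stated objective: idiomatic
-- what changed: Replaces the index loop with per-character branching and repeated string concatenation by two chained whole-string str.replace passes.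
import Mathlib
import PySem

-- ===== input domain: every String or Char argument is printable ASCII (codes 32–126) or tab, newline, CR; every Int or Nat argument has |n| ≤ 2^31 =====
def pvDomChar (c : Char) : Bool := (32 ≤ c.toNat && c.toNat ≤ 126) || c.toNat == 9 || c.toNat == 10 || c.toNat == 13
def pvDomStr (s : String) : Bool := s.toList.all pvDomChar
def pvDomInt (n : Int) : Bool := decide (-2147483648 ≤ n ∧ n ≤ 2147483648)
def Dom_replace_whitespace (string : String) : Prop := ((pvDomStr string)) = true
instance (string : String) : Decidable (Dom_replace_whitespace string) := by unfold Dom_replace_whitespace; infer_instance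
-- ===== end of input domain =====

-- B replaces A's index loop and per-character branching by two chained whole-string replace passes (idiomatic).


-- ===== PORT A =====
-- A iterates over the characters in order (range(len) + indexing) and appends per-character;
-- ported as a foldl over the character list with the same three branches and appends.
def replace_whitespace (string : String) : String :=
  String.ofList (string.toList.foldl (fun output c =>
    if c = '\t' then output ++ ['\t', '⇥']
    else if c = '\n' then output ++ ['⏎', '\n']
    else output ++ [c]) [])

-- ===== PORT B =====
def replace_whitespace_alt (string : String) : String :=
  PySem.Str.replace (PySem.Str.replace string "\t" "\t⇥") "\n" "⏎\n"

-- ===== PRECONDITION & SPEC =====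
def Spec_replace_whitespace (string : String) (out : String) : Prop := out = replace_whitespace_alt string
instance (string : String) (out : String) : Decidable (Spec_replace_whitespace string out) := by unfold Spec_replace_whitespace; infer_instance

-- ===== CLAIM (what is proved, stated in full; the proofs are below) =====
def Claim_equal_replace_whitespace : Prop := ∀ (string : String), Dom_replace_whitespace string → Spec_replace_whitespace string (replace_whitespace string)

-- ===== LEMMAS AND PROOFS =====

-- single-character replace is a per-character flatMap
theorem replace_go_single (o : Char) (new : List Char) :
    ∀ (fuel : Nat) (l acc : List Char), l.length ≤ fuel →
      PySem.Chars.replace.go [o] new fuel l acc =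
        acc.reverse ++ l.flatMap (fun c => if c = o then new else [c]) := by
  intro fuel
  induction fuel with
  | zero =>
    intro l acc h
    have : l = [] := List.eq_nil_of_length_eq_zero (Nat.le_zero.mp h)
    subst this
    simp [PySem.Chars.replace.go]
  | succ n ih =>
    intro l acc h
    cases l with
    | nil => simp [PySem.Chars.replace.go]
    | cons c t =>
      simp only [PySem.Chars.replace.go]
      by_cases hc : c = o
      · subst hc
        have hpre : List.isPrefixOf [c] (c :: t) = true := by
          simp [List.isPrefixOf]
        rw [if_pos hpre]
        have hd : List.drop [c].length (c :: t) = t := rfl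
        have ht : t.length ≤ n := by simpa using Nat.succ_le_succ_iff.mp h
        rw [hd, ih _ _ ht]
        simp
      · have hpre : List.isPrefixOf [o] (c :: t) = false := by
          simp [List.isPrefixOf]
          intro hco; exact hc hco.symm
        rw [if_neg (by simp [hpre])]
        have ht : t.length ≤ n := Nat.le_of_succ_le_succ h
        rw [ih _ _ ht]
        simp [hc]

theorem replace_single (o : Char) (new s : List Char) :
    PySem.Chars.replace s [o] new = s.flatMap (fun c => if c = o then new else [c]) := by
  rw [PySem.Chars.replace, if_neg (by simp)]
  exact replace_go_single o new s.length s [] (le_refl _)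

-- ===== VERDICT (by name: the statement is the Claim_ definition above) =====
theorem foldl_branches (l acc : List Char) :
    l.foldl (fun output c =>
      if c = '\t' then output ++ ['\t', '⇥']
      else if c = '\n' then output ++ ['⏎', '\n']
      else output ++ [c]) acc =
    acc ++ l.flatMap (fun c =>
      if c = '\t' then ['\t', '⇥'] else if c = '\n' then ['⏎', '\n'] else [c]) := by
  rw [show (fun output c =>
      if c = '\t' then output ++ ['\t', '⇥']
      else if c = '\n' then output ++ ['⏎', '\n']
      else output ++ [c]) = (fun (output : List Char) c => output ++
        (if c = '\t' then ['\t', '⇥'] else if c = '\n' then ['⏎', '\n'] else [c])) from by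
    funext output c; split_ifs <;> rfl]
  exact PySem.List.foldl_append_eq_flatMap _ _ _

theorem replace_whitespace_spec : Claim_equal_replace_whitespace := by
  intro s _
  unfold Spec_replace_whitespace replace_whitespace replace_whitespace_alt
  apply String.toList_inj.mp
  rw [PySem.Str.toList_replace, PySem.Str.toList_replace]
  have h1 : ("\t⇥" : String).toList = ['\t', '⇥'] := by decide
  have h2 : ("⏎\n" : String).toList = ['⏎', '\n'] := by decide
  have h3 : ("\t" : String).toList = ['\t'] := by decide
  have h4 : ("\n" : String).toList = ['\n'] := by decide
  rw [h1, h2, h3, h4, replace_single, replace_single, List.flatMap_assoc]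
  rw [foldl_branches]
  rw [String.toList_ofList]
  apply List.flatMap_congr
  intro c _
  by_cases ht : c = '\t'
  · subst ht; simp
  · by_cases hn : c = '\n'
    · subst hn; simp
    · simp [ht, hn]
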